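-- pv_equiv track=rewrite | github.com/libharmo/libharmo.github.io | code/py/version_recommendation/pdf_generator.py | get_pkg_files
-- ===== SOURCE A (Python) =====
-- def get_pkg_files(java_files,_module):
--     new_files = {}
--     for java_file in java_files:
--         java_file = java_file.replace(_module, "")
--         if java_file.startswith("/"):
--             java_file = java_file[1:]
--         r = java_file.rfind("/")
--         package = java_file[:r]
--         java_file = java_file[r + 1:]
--         if package not in new_files:
--             new_files[package] = []
--         new_files[package].append(java_file)
--     return new_files
-- ===== SOURCE B (Python) =====
-- def get_pkg_files(java_files, _module):
--     def parse(jf):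
--         s = jf.replace(_module, "")
--         if s.startswith("/"):
--             s = s[1:]
--         r = s.rfind("/")
--         return (s[:r], s[r + 1:])
--     pairs = [parse(jf) for jf in java_files]
--     packages = list(dict.fromkeys(p for p, _ in pairs))
--     return {pkg: [f for p, f in pairs if p == pkg] for pkg in packages}
-- ===== Notes on version B (the rewrite author's own statement) =====
-- stated objective: alternative
-- what changed: Replaces A's single pass that incrementally builds a dict (membership test, empty-list insert, append per file) with a batch decomposition: parse every file into a (package, filename) pair once, take the ordered dedup of the packages, and build each package's file list by one filter pass over the parsed pairs.
import Mathlib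
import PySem

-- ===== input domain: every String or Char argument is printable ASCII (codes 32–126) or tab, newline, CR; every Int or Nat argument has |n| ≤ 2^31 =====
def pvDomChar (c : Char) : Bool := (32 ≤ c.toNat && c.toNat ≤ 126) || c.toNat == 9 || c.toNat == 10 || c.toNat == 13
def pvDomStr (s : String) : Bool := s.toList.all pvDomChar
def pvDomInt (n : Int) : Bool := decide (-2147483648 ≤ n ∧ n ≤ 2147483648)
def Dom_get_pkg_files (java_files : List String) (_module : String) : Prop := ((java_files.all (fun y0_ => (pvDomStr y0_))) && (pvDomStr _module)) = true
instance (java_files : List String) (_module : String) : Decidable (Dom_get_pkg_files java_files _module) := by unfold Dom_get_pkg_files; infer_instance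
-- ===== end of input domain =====

-- B groups by a different decomposition (parse once, ordered-dedup of packages, one filter pass per package)
-- instead of A's incremental dict building; objective: alternative (same results, not claimed faster).

-- ===== PORT A =====
def get_pkg_files (java_files : List String) (_module : String) : List (String × List String) :=
  (java_files.foldl (fun new_files java_file =>
      let java_file := PySem.Str.replace java_file _module ""
      let java_file := if PySem.Str.startswith java_file "/" then PySem.Str.slice java_file (some 1) none else java_file
      let r := PySem.Str.rfind java_file "/"
      let package := PySem.Str.slice java_file none (some r)
      let java_file := PySem.Str.slice java_file (some (r + 1)) none
      let new_files := if new_files.contains package then new_files else new_files.insert package []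
      new_files.modify package [] (· ++ [java_file]))
    PySem.Dict.empty).items

-- ===== PORT B =====
-- B's inner helper parse(jf): the (package, filename) pair of one java file
def pvParse (_module : String) (jf : String) : String × String :=
  let s := PySem.Str.replace jf _module ""
  let s := if PySem.Str.startswith s "/" then PySem.Str.slice s (some 1) none else s
  let r := PySem.Str.rfind s "/"
  (PySem.Str.slice s none (some r), PySem.Str.slice s (some (r + 1)) none)

def get_pkg_files_alt (java_files : List String) (_module : String) : List (String × List String) :=
  let pairs := java_files.map (pvParse _module)
  (PySem.List.dedup (pairs.map Prod.fst)).map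
    (fun pkg => (pkg, (pairs.filter (fun q => q.1 == pkg)).map Prod.snd))

-- ===== PRECONDITION & SPEC =====
def Spec_get_pkg_files (java_files : List String) (_module : String) (out : List (String × List String)) : Prop := out = get_pkg_files_alt java_files _module
instance (java_files : List String) (_module : String) (out : List (String × List String)) : Decidable (Spec_get_pkg_files java_files _module out) := by unfold Spec_get_pkg_files; infer_instance

-- ===== CLAIM (what is proved, stated in full; the proofs are below) =====
def Claim_equal_get_pkg_files : Prop := ∀ (java_files : List String) (_module : String), Dom_get_pkg_files java_files _module → Spec_get_pkg_files java_files _module (get_pkg_files java_files _module)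

-- ===== LEMMAS AND PROOFS =====

-- A's "if package not in d: d[package] = []" followed by append is one modify-with-default.
theorem pv_insert_modify (d : PySem.Dict String (List String)) (p f : String) :
    (if d.contains p then d else d.insert p []).modify p [] (· ++ [f])
      = d.modify p [] (· ++ [f]) := by
  by_cases h : d.contains p
  · simp [h]
  · have hf : List.find? (fun q => q.1 == p) d.items = none := by
      simp only [PySem.Dict.contains] at h
      simp only [List.find?_eq_none]
      intro q hq
      simp only [Bool.not_eq_true]
      by_contra hc
      exact h (List.any_eq_true.2 ⟨q, hq, by simpa using hc⟩)
    have hmap : List.map (fun (q : String × List String) => if q.1 = p then (p, [f]) else q) d.items = d.items := by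
      conv_rhs => rw [← List.map_id d.items]
      apply List.map_congr_left
      intro q hq
      have hne := List.find?_eq_none.1 hf q hq
      simp only [beq_iff_eq] at hne
      simp [hne]
    simp only [PySem.Dict.modify, PySem.Dict.insert, PySem.Dict.getD, PySem.Dict.get?, h, hf]
    simp [PySem.Dict.contains, List.find?_append, hf, List.map_append, hmap]

-- A's loop body is the modify-with-default step on the parsed pair.
theorem pv_step_eq (_module : String) (d : PySem.Dict String (List String)) (jf : String) :
    (let java_file := PySem.Str.replace jf _module ""
     let java_file := if PySem.Str.startswith java_file "/" then PySem.Str.slice java_file (some 1) none else java_file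
     let r := PySem.Str.rfind java_file "/"
     let package := PySem.Str.slice java_file none (some r)
     let java_file := PySem.Str.slice java_file (some (r + 1)) none
     let d' := if d.contains package then d else d.insert package []
     d'.modify package [] (· ++ [java_file]))
      = d.modify (pvParse _module jf).1 [] (· ++ [(pvParse _module jf).2]) := by
  simp only [pvParse]
  exact pv_insert_modify d _ _

theorem get_pkg_files_eq_fold_pairs (java_files : List String) (_module : String) :
    get_pkg_files java_files _module
      = ((java_files.map (pvParse _module)).foldl
          (fun d p => d.modify p.1 [] (· ++ [p.2])) PySem.Dict.empty).items := by
  unfold get_pkg_files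
  rw [List.foldl_map]
  congr 2
  funext d jf
  exact pv_step_eq _module d jf

-- ===== VERDICT (by name: the statement is the Claim_ definition above) =====
theorem get_pkg_files_spec : Claim_equal_get_pkg_files := by
  intro java_files _module _
  unfold Spec_get_pkg_files
  rw [get_pkg_files_eq_fold_pairs]
  have hnd : (((java_files.map (pvParse _module)).foldl
      (fun d p => d.modify p.1 [] (· ++ [p.2])) PySem.Dict.empty)).keys.Nodup :=
    PySem.Dict.nodup_keys_foldl_modify_key _ Prod.fst [] _ _ PySem.Dict.nodup_keys_empty
  rw [PySem.Dict.items_eq_map_keys _ hnd []]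
  rw [PySem.Dict.keys_foldl_modify_key]
  unfold get_pkg_files_alt
  simp only [PySem.Dict.keys_empty, PySem.Set.update_nil_left, PySem.List.dedup_eq_ofList]
  apply List.map_congr_left
  intro pkg _
  rw [PySem.Dict.getD_foldl_modify_append]
  simp [PySem.Dict.getD_empty]
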